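-- pv_equiv track=rewrite | github.com/arhcoder/Birthday-Paradox | python/Mapaches-graficados.py | comprobar
-- ===== SOURCE A (Python) =====
-- def comprobar(Mapaches):
--     coincidencias = 0
--     for day in range (1, 366):
--         suma_coincidencias = 0
--         for i in range(0, len(Mapaches)):
--             if Mapaches[i] == day:
--                 suma_coincidencias += 1
--         if suma_coincidencias > 1:
--             coincidencias += 1
--     return coincidencias
-- ===== SOURCE B (Python) =====
-- def comprobar(Mapaches):
--     s = sorted(Mapaches)
--     total = 0
--     i = 0
--     n = len(s)
--     while i < n:
--         j = i
--         while j < n and s[j] == s[i]: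
--             j += 1
--         if 1 <= s[i] <= 365 and j - i > 1:
--             total += 1
--         i = j
--     return total
-- ===== Notes on version B (the rewrite author's own statement) =====
-- stated objective: faster
-- what changed: Replaces A's 365 full scans of the list (one per day) by a single sort followed by one run-length scan over maximal runs of equal values.
import Mathlib
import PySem

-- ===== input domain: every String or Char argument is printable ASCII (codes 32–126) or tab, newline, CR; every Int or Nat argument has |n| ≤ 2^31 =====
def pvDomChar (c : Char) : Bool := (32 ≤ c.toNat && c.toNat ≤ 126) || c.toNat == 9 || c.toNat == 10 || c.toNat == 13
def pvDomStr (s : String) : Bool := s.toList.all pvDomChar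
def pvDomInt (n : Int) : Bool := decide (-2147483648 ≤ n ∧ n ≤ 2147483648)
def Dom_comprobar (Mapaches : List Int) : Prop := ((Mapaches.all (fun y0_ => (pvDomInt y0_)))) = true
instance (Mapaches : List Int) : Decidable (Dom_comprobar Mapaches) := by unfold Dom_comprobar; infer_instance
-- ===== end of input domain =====

-- B replaces A's 365 repeated scans of the list by one sort plus a single run-length scan (faster by a large constant factor).


-- ===== PORT A =====
def comprobar (Mapaches : List Int) : Int :=
  (PySem.List.pyRange 1 366 1).foldl (fun coincidencias day =>
    let suma_coincidencias : Int :=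
      (PySem.List.pyRange 0 (Mapaches.length : Int) 1).foldl
        (fun s i => if PySem.List.pyGetD Mapaches i 0 == day then s + 1 else s) 0
    if suma_coincidencias > 1 then coincidencias + 1 else coincidencias) 0

-- ===== PORT B =====
-- B's inner while-pair: take the maximal run of elements equal to the head, then continue after it.
def runCount : List Int → Int
  | [] => 0
  | x :: xs =>
    let run := xs.takeWhile (fun y => y == x)
    let rest := xs.dropWhile (fun y => y == x)
    (if 1 ≤ x ∧ x ≤ 365 ∧ 1 < run.length + 1 then 1 else 0) + runCount rest
termination_by l => l.length
decreasing_by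
  exact Nat.lt_succ_of_le (List.length_dropWhile_le _ _)

def comprobar_alt (Mapaches : List Int) : Int :=
  runCount (PySem.List.sorted Mapaches (fun x => x) false)

-- ===== PRECONDITION & SPEC =====
def Spec_comprobar (Mapaches : List Int) (out : Int) : Prop := out = comprobar_alt Mapaches
instance (Mapaches : List Int) (out : Int) : Decidable (Spec_comprobar Mapaches out) := by unfold Spec_comprobar; infer_instance

-- ===== CLAIM (what is proved, stated in full; the proofs are below) =====
def Claim_equal_comprobar : Prop := ∀ (Mapaches : List Int), Dom_comprobar Mapaches → Spec_comprobar Mapaches (comprobar Mapaches)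

-- ===== LEMMAS AND PROOFS =====

-- a counting foldl is countP
theorem foldl_ite_count {α : Type} (l : List α) (P : α → Bool) (init : Int) :
    l.foldl (fun c x => if P x then c + 1 else c) init = init + (l.countP P : Int) := by
  induction l generalizing init with
  | nil => simp
  | cons a t ih =>
    simp only [List.foldl_cons, List.countP_cons, ih]
    by_cases h : P a = true <;> simp [h] <;> push_cast <;> ring

-- A's value: count of days 1..365 whose multiplicity in Mapaches exceeds 1
theorem comprobar_eq_countP (m : List Int) :
    comprobar m = ((PySem.List.pyRange 1 366 1).countP (fun d => decide (1 < m.count d)) : Int) := by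
  unfold comprobar
  have hinner : ∀ day : Int,
      (PySem.List.pyRange 0 (m.length : Int) 1).foldl
        (fun s i => if PySem.List.pyGetD m i 0 == day then s + 1 else s) 0
      = (m.count day : Int) := by
    intro day
    rw [PySem.List.foldl_pyRange_zero_pyGetD' m 0 (fun s v => if v == day then s + 1 else s) 0]
    rw [foldl_ite_count m (fun v => v == day) 0]
    simp [List.count]
  have : (fun (c : Int) (day : Int) =>
      let suma : Int := (PySem.List.pyRange 0 (m.length : Int) 1).foldl
        (fun s i => if PySem.List.pyGetD m i 0 == day then s + 1 else s) 0
      if suma > 1 then c + 1 else c)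
      = fun c day => if decide (1 < m.count day) then c + 1 else c := by
    funext c day
    simp only [hinner]
    by_cases h : 1 < m.count day <;> simp [h] <;> omega
  rw [this, foldl_ite_count]
  simp

-- countP over a nodup list under two predicates agreeing except possibly at x (where Q is false)
theorem countP_diff_single (r : List Int) (P Q : Int → Bool) (x : Int)
    (hr : r.Nodup) (hagree : ∀ d ∈ r, d ≠ x → P d = Q d) (hQx : Q x = false) :
    r.countP P = r.countP Q + (if x ∈ r ∧ P x then 1 else 0) := by
  induction r with
  | nil => simp
  | cons a t ih =>
    have hnd := hr
    simp only [List.nodup_cons] at hnd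
    by_cases hax : a = x
    · subst hax
      have ht : t.countP P = t.countP Q := by
        apply List.countP_congr
        intro d hd
        have : d ≠ a := fun h => hnd.1 (h ▸ hd)
        rw [hagree d (List.mem_cons_of_mem _ hd) this]
      simp only [List.countP_cons, ht, hQx, List.mem_cons]
      by_cases hPa : P a = true <;> simp [hPa]
    · have ha : P a = Q a := hagree a (List.mem_cons_self) hax
      have ht := ih hnd.2 (fun d hd hne => hagree d (List.mem_cons_of_mem _ hd) hne)
      have hx : (x ∈ a :: t) ↔ x ∈ t := by
        constructor
        · intro h
          rcases List.mem_cons.mp h with h | h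
          · exact absurd h.symm hax
          · exact h
        · exact fun h => List.mem_cons_of_mem _ h
      simp only [List.countP_cons, ht, ha]
      by_cases hxt : x ∈ t <;> by_cases hPx : P x = true <;>
        simp [hx, hxt, hPx] <;> omega

-- runCount unfolding on a cons
theorem runCount_cons (x : Int) (xs : List Int) :
    runCount (x :: xs) =
      (if 1 ≤ x ∧ x ≤ 365 ∧ 1 < (xs.takeWhile (fun y => y == x)).length + 1 then (1:Int) else 0)
        + runCount (xs.dropWhile (fun y => y == x)) := by
  rw [runCount]

-- runCount on a sorted list is the same countP
theorem runCount_sorted_aux (n : Nat) : ∀ s : List Int, s.length ≤ n → s.Pairwise (· ≤ ·) →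
    runCount s = ((PySem.List.pyRange 1 366 1).countP (fun d => decide (1 < s.count d)) : Int) := by
  induction n with
  | zero =>
    intro s hlen _
    have : s = [] := List.eq_nil_of_length_eq_zero (Nat.le_zero.mp hlen)
    subst this
    simp [runCount]
  | succ n ih =>
    intro s hlen hs
    cases s with
    | nil => simp [runCount]
    | cons x xs =>
      set run := xs.takeWhile (fun y => y == x) with hrundef
      set rest := xs.dropWhile (fun y => y == x) with hrestdef
      have hsplit : x :: xs = x :: (run ++ rest) := by
        rw [hrundef, hrestdef, List.takeWhile_append_dropWhile]
      have hrun_all : ∀ y ∈ run, y = x := by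
        intro y hy
        have := List.mem_takeWhile_imp hy
        simpa using this
      have hxs_ge : ∀ y ∈ xs, x ≤ y := (List.pairwise_cons.mp hs).1
      have hxs_pw : xs.Pairwise (· ≤ ·) := (List.pairwise_cons.mp hs).2
      have hrest_sub : rest.Sublist xs := List.dropWhile_sublist _
      have hrest_pw : rest.Pairwise (· ≤ ·) := hxs_pw.sublist hrest_sub
      have hrest_len : rest.length ≤ n := by
        have h1 : rest.length ≤ xs.length := by
          rw [hrestdef]; exact List.length_dropWhile_le _ _
        simp at hlen
        omega
      have hrest_ne : ∀ y ∈ rest, y ≠ x := by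
        intro y hy
        cases hrestc : rest with
        | nil => simp [hrestc] at hy
        | cons r0 r' =>
          have hr0 : ¬ ((r0 == x) = true) := by
            have := List.head?_dropWhile_not (fun y => y == x) xs
            rw [← hrestdef, hrestc] at this
            simpa using this
          have hr0x : r0 ≠ x := by simpa using hr0
          have hr0_le : x ≤ r0 := hxs_ge r0 (hrest_sub.mem (by simp [hrestc]))
          have hr0_lt : x < r0 := lt_of_le_of_ne hr0_le (fun h => hr0x h.symm)
          rw [hrestc] at hy
          have hrest_pw' := hrestc ▸ hrest_pw
          rcases List.mem_cons.mp hy with h | h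
          · exact fun hh => hr0x (h ▸ hh)
          · have := (List.pairwise_cons.mp hrest_pw').1 y h
            intro hh; rw [hh] at this; exact absurd this (not_le_of_gt hr0_lt)
      have hcount_x : (x :: xs).count x = run.length + 1 := by
        rw [hsplit, List.count_cons_self, List.count_append]
        have h1 : run.count x = run.length := List.count_eq_length.mpr (by
          intro y hy; exact ((hrun_all y hy).symm ▸ rfl))
        have h2 : rest.count x = 0 := List.count_eq_zero.mpr (by
          intro h; exact hrest_ne x h rfl)
        omega
      have hcount_ne : ∀ d : Int, d ≠ x → (x :: xs).count d = rest.count d := by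
        intro d hd
        have hrun0 : run.count d = 0 := List.count_eq_zero.mpr (by
          intro h; exact hd (hrun_all d h))
        rw [hsplit]
        simp [List.count_append, hrun0, hd.symm]
      rw [runCount_cons, ← hrundef, ← hrestdef, ih rest hrest_len hrest_pw]
      rw [countP_diff_single (PySem.List.pyRange 1 366 1)
          (fun d => decide (1 < (x :: xs).count d)) (fun d => decide (1 < rest.count d)) x
          (PySem.List.nodup_pyRange_one 1 366)
          (fun d _ hne => by simp [hcount_ne d hne])
          (by simp [List.count_eq_zero.mpr (fun h => hrest_ne x h rfl)])]
      have hmem : x ∈ PySem.List.pyRange 1 366 1 ↔ 1 ≤ x ∧ x < 366 :=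
        PySem.List.mem_pyRange_one
      have hiff : (x ∈ PySem.List.pyRange 1 366 1 ∧ (decide (1 < (x :: xs).count x)) = true)
          ↔ (1 ≤ x ∧ x ≤ 365 ∧ 1 < run.length + 1) := by
        constructor
        · rintro ⟨h1, h2⟩
          rw [hmem] at h1
          simp [hcount_x] at h2
          exact ⟨h1.1, by omega, by omega⟩
        · rintro ⟨h1, h2, h3⟩
          exact ⟨hmem.mpr ⟨h1, by omega⟩, by simp [hcount_x]; omega⟩
      by_cases hc : 1 ≤ x ∧ x ≤ 365 ∧ 1 < run.length + 1
      · rw [if_pos hc, if_pos (hiff.mpr hc)]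
        push_cast
        ring
      · rw [if_neg hc, if_neg (fun h => hc (hiff.mp h))]
        push_cast
        ring

-- ===== VERDICT (by name: the statement is the Claim_ definition above) =====
theorem comprobar_spec : Claim_equal_comprobar := by
  intro m _
  unfold Spec_comprobar comprobar_alt
  rw [comprobar_eq_countP]
  have hperm : (PySem.List.sorted m (fun x => x) false).Perm m :=
    PySem.List.sorted_perm m _ _
  rw [runCount_sorted_aux _ _ le_rfl (by
    have := PySem.List.sorted_pairwise m (fun x => x) (κ := Int)
    simpa using this)]
  congr 1
  apply List.countP_congr
  intro d _
  simp [hperm.count_eq]
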